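-- pv_equiv track=rewrite | github.com/steadydoer/problem-solving | programmers/level3/12904/pg12904.py | get_palindrome_length
-- ===== SOURCE A (Python) =====
-- def is_palindrome(s):
--     result = True
--     if len(s) == 1:
--         return result
--     for i in range((len(s) + 1) // 2):
--         if s[i] != s[-1 - i]:
--             result = False
--             break
--     return result
--
-- def get_palindrome_length(s, mid, even=True):
--     palindrome_length = 0
--     start = mid
--     if even:
--         stop = mid + 2
--     else:
--         stop = mid + 1
--
--     while 0 <= start and stop <= len(s):
--         if not is_palindrome(s[start:stop]):
--             break
--         palindrome_length = stop - start
--         start -= 1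
--         stop += 1
--     return palindrome_length
-- ===== SOURCE B (Python) =====
-- def get_palindrome_length(s, mid, even=True):
--     lo = mid
--     hi = mid + 1 if even else mid
--     length = 0
--     while 0 <= lo and hi < len(s) and s[lo] == s[hi]:
--         length = hi - lo + 1
--         lo -= 1
--         hi += 1
--     return length
-- ===== Notes on version B (the rewrite author's own statement) =====
-- stated objective: faster
-- what changed: B expands from the center comparing only the two new end characters at each step, instead of re-checking the whole current substring for palindromicity at every expansion.
import Mathlib
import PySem

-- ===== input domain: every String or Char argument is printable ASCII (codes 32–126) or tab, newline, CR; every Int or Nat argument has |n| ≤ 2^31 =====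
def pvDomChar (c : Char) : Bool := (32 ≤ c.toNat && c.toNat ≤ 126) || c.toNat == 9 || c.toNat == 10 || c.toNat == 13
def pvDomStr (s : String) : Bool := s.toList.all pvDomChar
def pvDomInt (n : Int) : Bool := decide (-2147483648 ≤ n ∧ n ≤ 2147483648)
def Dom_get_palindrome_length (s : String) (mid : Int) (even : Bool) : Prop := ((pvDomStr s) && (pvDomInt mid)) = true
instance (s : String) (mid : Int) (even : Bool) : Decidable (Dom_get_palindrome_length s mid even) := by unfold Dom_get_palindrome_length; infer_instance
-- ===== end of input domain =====

-- B expands from the center comparing only the two new end characters per step (O(n)),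
-- instead of re-checking the whole current substring at every expansion as A does (O(n^2)).

-- ===== PORT A =====
-- the 'for i in range(...)' loop of is_palindrome, with its break
def pvIpLoop (l : List Char) : List Int → Bool
  | [] => true
  | i :: rest =>
    if PySem.List.pyGet? l i ≠ PySem.List.pyGet? l (-1 - i) then false
    else pvIpLoop l rest

def is_palindrome (l : List Char) : Bool :=
  if (l.length : Int) = 1 then true
  else pvIpLoop l (PySem.List.pyRange 0 (PySem.Int.floordiv ((l.length : Int) + 1) 2) 1)

-- the while loop of A
def pvLoopA (l : List Char) (start stop acc : Int) : Int :=
  if h : 0 ≤ start ∧ stop ≤ (l.length : Int) then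
    if is_palindrome (PySem.List.slice l (some start) (some stop)) then
      pvLoopA l (start - 1) (stop + 1) (stop - start)
    else acc
  else acc
termination_by (start + 1).toNat
decreasing_by omega

def get_palindrome_length (s : String) (mid : Int) (even : Bool) : Int :=
  pvLoopA s.toList mid (if even then mid + 2 else mid + 1) 0

-- ===== PORT B =====
-- the while loop of B: compare only the two end characters each step
def pvLoopB (l : List Char) (lo hi acc : Int) : Int :=
  if h : 0 ≤ lo ∧ hi < (l.length : Int) ∧ PySem.List.pyGet? l lo = PySem.List.pyGet? l hi then
    pvLoopB l (lo - 1) (hi + 1) (hi - lo + 1)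
  else acc
termination_by (lo + 1).toNat
decreasing_by omega

def get_palindrome_length_alt (s : String) (mid : Int) (even : Bool) : Int :=
  pvLoopB s.toList mid (if even then mid + 1 else mid) 0

-- ===== PRECONDITION & SPEC =====
def Spec_get_palindrome_length (s : String) (mid : Int) (even : Bool) (out : Int) : Prop := out = get_palindrome_length_alt s mid even
instance (s : String) (mid : Int) (even : Bool) (out : Int) : Decidable (Spec_get_palindrome_length s mid even out) := by unfold Spec_get_palindrome_length; infer_instance

-- ===== CLAIM (what is proved, stated in full; the proofs are below) =====
def Claim_equal_get_palindrome_length : Prop := ∀ (s : String) (mid : Int) (even : Bool), Dom_get_palindrome_length s mid even → Spec_get_palindrome_length s mid even (get_palindrome_length s mid even)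

-- ===== LEMMAS AND PROOFS =====

lemma pvIpLoop_iff (l : List Char) (r : List Int) :
    pvIpLoop l r = true ↔ ∀ i ∈ r, PySem.List.pyGet? l i = PySem.List.pyGet? l (-1 - i) := by
  induction r with
  | nil => simp [pvIpLoop]
  | cons i rest ih =>
    simp only [pvIpLoop]
    by_cases h : PySem.List.pyGet? l i = PySem.List.pyGet? l (-1 - i)
    · simp [h, ih]
    · simp [h]

lemma pal_char (l : List Char) :
    (∀ k (hk : k < (l.length + 1) / 2), l[k]'(by omega) = l[l.length - 1 - k]'(by omega)) ↔
      l.reverse = l := by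
  constructor
  · intro h
    apply List.ext_getElem (by simp)
    intro i h1 h2
    rw [List.getElem_reverse]
    by_cases hi : i < (l.length + 1) / 2
    · exact (h i hi).symm
    · have hj : l.length - 1 - i < (l.length + 1) / 2 := by omega
      have := h (l.length - 1 - i) hj
      have he : l.length - 1 - (l.length - 1 - i) = i := by omega
      simpa [he] using this
  · intro h k hk
    have hk' : k < l.length := by omega
    have h1 : l.reverse[k]'(by simpa using hk') = l[k]'hk' := by
      congr 1
    rw [List.getElem_reverse] at h1
    exact h1.symm

lemma isPal_iff (l : List Char) : is_palindrome l = true ↔ l.reverse = l := by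
  unfold is_palindrome
  by_cases h1 : (l.length : Int) = 1
  · have : l.length = 1 := by exact_mod_cast h1
    obtain ⟨a, rfl⟩ := List.length_eq_one_iff.mp this
    simp
  · simp only [h1, if_false]
    have hfd : PySem.Int.floordiv ((l.length : Int) + 1) 2 = (((l.length + 1) / 2 : Nat) : Int) := by
      rw [PySem.Int.floordiv_eq_ediv_of_pos (by omega)]
      push_cast [Int.natCast_div]
      norm_num
    rw [hfd, PySem.List.pyRange_zero_nat, pvIpLoop_iff]
    rw [← pal_char l]
    constructor
    · intro h k hk
      have := h ((k : Int)) (List.mem_map.mpr ⟨k, List.mem_range.mpr hk, rfl⟩)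
      have hk' : k < l.length := by omega
      have e1 : PySem.List.pyGet? l (k : Int) = some (l[k]'hk') := by
        simp [PySem.List.pyGet?_natCast, List.getElem?_eq_getElem hk']
      have e2 : PySem.List.pyGet? l (-1 - (k : Int)) = some (l[l.length - 1 - k]'(by omega)) := by
        have : (-1 - (k : Int)) = -(((k + 1 : Nat)) : Int) := by push_cast; ring
        rw [this, PySem.List.pyGet?_neg_natCast l (k + 1) (by omega) (by omega)]
        have : l.length - (k + 1) = l.length - 1 - k := by omega
        rw [this, List.getElem?_eq_getElem (by omega)]
      rw [e1, e2] at this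
      exact Option.some.inj this
    · intro h i hi
      simp only [List.mem_map, List.mem_range] at hi
      obtain ⟨k, hk, rfl⟩ := hi
      have hk' : k < l.length := by omega
      have := h k hk
      have e1 : PySem.List.pyGet? l (k : Int) = some (l[k]'hk') := by
        simp [PySem.List.pyGet?_natCast, List.getElem?_eq_getElem hk']
      have e2 : PySem.List.pyGet? l (-1 - (k : Int)) = some (l[l.length - 1 - k]'(by omega)) := by
        have : (-1 - (k : Int)) = -(((k + 1 : Nat)) : Int) := by push_cast; ring
        rw [this, PySem.List.pyGet?_neg_natCast l (k + 1) (by omega) (by omega)]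
        have : l.length - (k + 1) = l.length - 1 - k := by omega
        rw [this, List.getElem?_eq_getElem (by omega)]
      rw [e1, e2, this]

lemma take_drop_decomp (l : List Char) (a b : Nat) (h2 : a + 2 ≤ b) (hb : b ≤ l.length) :
    (l.drop a).take (b - a) =
      l[a]'(by omega) :: ((l.drop (a + 1)).take ((b - 1) - (a + 1)) ++ [l[b - 1]'(by omega)]) := by
  have ha : a < l.length := by omega
  rw [List.drop_eq_getElem_cons ha]
  have e1 : b - a = (b - a - 1) + 1 := by omega
  rw [e1, List.take_succ_cons]
  have e2 : b - a - 1 = (b - a - 2) + 1 := by omega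
  rw [e2, List.take_succ]
  have e3 : (l.drop (a + 1))[b - a - 2]? = some (l[b - 1]'(by omega)) := by
    rw [List.getElem?_drop]
    rw [List.getElem?_eq_getElem (by omega)]
    simp only [show a + 1 + (b - a - 2) = b - 1 from by omega]
  rw [e3]
  have e4 : (b - 1) - (a + 1) = b - a - 2 := by omega
  simp [e4]

lemma pal_ends (c d : Char) (inner : List Char) :
    (c :: (inner ++ [d])).reverse = c :: (inner ++ [d]) ↔ c = d ∧ inner.reverse = inner := by
  have hrev : (c :: (inner ++ [d])).reverse = d :: (inner.reverse ++ [c]) := by simp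
  rw [hrev]
  constructor
  · intro h
    injection h with h1 h2
    subst h1
    have := List.append_inj h2 (by simp)
    exact ⟨rfl, this.1⟩
  · rintro ⟨rfl, h2⟩
    rw [h2]

lemma loopAB (l : List Char) : ∀ (N : Nat) (start stop acc : Int),
    (start + 1).toNat ≤ N → 1 ≤ stop - start →
    ((0 ≤ start ∧ stop ≤ (l.length : Int)) →
      (PySem.List.slice l (some (start + 1)) (some (stop - 1))).reverse =
        PySem.List.slice l (some (start + 1)) (some (stop - 1))) →
    pvLoopA l start stop acc = pvLoopB l start (stop - 1) acc := by
  intro N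
  induction N with
  | zero =>
    intro start stop acc hN _ _
    have hs : start < 0 := by omega
    rw [pvLoopA, pvLoopB]
    rw [dif_neg (by omega), dif_neg (by omega)]
  | succ N ih =>
    intro start stop acc hN hws hinv
    rw [pvLoopA, pvLoopB]
    by_cases hc : 0 ≤ start ∧ stop ≤ (l.length : Int)
    · rw [dif_pos hc]
      have hlt : start < stop := by omega
      have hinv' := hinv hc
      -- the current window as a drop/take
      have hsl : PySem.List.slice l (some start) (some stop) =
          (l.drop start.toNat).take (stop.toNat - start.toNat) :=
        PySem.List.slice_toNat l (by omega) (by omega)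
      by_cases h1 : stop - start = 1
      · -- window of length 1
        have hbe : stop.toNat = start.toNat + 1 := by omega
        have hw : PySem.List.slice l (some start) (some stop) = [l[start.toNat]'(by omega)] := by
          rw [hsl, show stop.toNat - start.toNat = 0 + 1 from by omega,
            List.drop_eq_getElem_cons (show start.toNat < l.length from by omega),
            List.take_succ_cons, List.take_zero]
        have hpal : is_palindrome (PySem.List.slice l (some start) (some stop)) = true := by
          rw [isPal_iff, hw]; rfl
        have hg : PySem.List.pyGet? l start = PySem.List.pyGet? l (stop - 1) := by
          have : stop - 1 = start := by omega
          rw [this]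
        have hgrd : 0 ≤ start ∧ stop - 1 < (l.length : Int) ∧
            PySem.List.pyGet? l start = PySem.List.pyGet? l (stop - 1) := ⟨hc.1, by omega, hg⟩
        rw [if_pos hpal, dif_pos hgrd]
        have e1 : stop - 1 + 1 = stop + 1 - 1 := by ring
        have e2 : stop - 1 - start + 1 = stop - start := by ring
        rw [e1, e2]
        apply ih (start - 1) (stop + 1) (stop - start) (by omega) (by omega)
        intro _
        have e3 : start - 1 + 1 = start := by ring
        have e4 : stop + 1 - 1 = stop := by ring
        rw [e3, e4, hw]
        rfl
      · -- window of length ≥ 2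
        have h2 : start.toNat + 2 ≤ stop.toNat := by omega
        have hbl : stop.toNat ≤ l.length := by omega
        set c := l[start.toNat]'(by omega) with hc_def
        set d := l[stop.toNat - 1]'(by omega) with hd_def
        have hinner : PySem.List.slice l (some (start + 1)) (some (stop - 1)) =
            (l.drop (start.toNat + 1)).take ((stop.toNat - 1) - (start.toNat + 1)) := by
          rw [PySem.List.slice_toNat l (by omega) (by omega),
            show (stop - 1).toNat = stop.toNat - 1 from by omega,
            show (start + 1).toNat = start.toNat + 1 from by omega]
        have hdec : PySem.List.slice l (some start) (some stop) =
            c :: (((l.drop (start.toNat + 1)).take ((stop.toNat - 1) - (start.toNat + 1))) ++ [d]) := by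
          rw [hsl]
          exact take_drop_decomp l start.toNat stop.toNat h2 hbl
        have hpal_iff : is_palindrome (PySem.List.slice l (some start) (some stop)) = true ↔ c = d := by
          rw [isPal_iff, hdec, pal_ends]
          rw [hinner] at hinv'
          exact ⟨fun h => h.1, fun h => ⟨h, hinv'⟩⟩
        have e1 : PySem.List.pyGet? l start = some c := by
          rw [PySem.List.pyGet?_eq_some_getElem l (by omega) (by omega)]
        have e2 : PySem.List.pyGet? l (stop - 1) = some d := by
          rw [PySem.List.pyGet?_eq_some_getElem l (by omega) (by omega)]
          simp only [show (stop - 1).toNat = stop.toNat - 1 from by omega]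
          rw [hd_def]
        by_cases hcd : c = d
        · have hgrd : 0 ≤ start ∧ stop - 1 < (l.length : Int) ∧
              PySem.List.pyGet? l start = PySem.List.pyGet? l (stop - 1) := ⟨hc.1, by omega, by rw [e1, e2, hcd]⟩
          rw [if_pos (hpal_iff.mpr hcd), dif_pos hgrd]
          have ea : stop - 1 + 1 = stop + 1 - 1 := by ring
          have eb : stop - 1 - start + 1 = stop - start := by ring
          rw [ea, eb]
          apply ih (start - 1) (stop + 1) (stop - start) (by omega) (by omega)
          intro _
          have e3 : start - 1 + 1 = start := by ring
          have e4 : stop + 1 - 1 = stop := by ring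
          rw [e3, e4, hdec, pal_ends]
          rw [hinner] at hinv'
          exact ⟨hcd, hinv'⟩
        · have hnp : ¬ is_palindrome (PySem.List.slice l (some start) (some stop)) = true := by
            rw [hpal_iff]; exact hcd
          rw [if_neg hnp, dif_neg (by rw [e1, e2]; rintro ⟨-, -, h⟩; exact hcd (Option.some.inj h))]
    · rw [dif_neg hc, dif_neg (by omega)]

lemma empty_inner (l : List Char) (a b : Int) (h0 : 0 ≤ a) (hb : b ≤ a) (h0b : 0 ≤ b) :
    PySem.List.slice l (some a) (some b) = [] := by
  rw [PySem.List.slice_toNat l h0 h0b]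
  have : b.toNat - a.toNat = 0 := by omega
  rw [this]
  simp

-- ===== VERDICT (by name: the statement is the Claim_ definition above) =====
theorem get_palindrome_length_spec : Claim_equal_get_palindrome_length := by
  unfold Claim_equal_get_palindrome_length
  intro s mid even _
  unfold Spec_get_palindrome_length get_palindrome_length get_palindrome_length_alt
  cases even with
  | true =>
    have h := loopAB s.toList ((mid + 1).toNat) mid (mid + 2) 0 le_rfl (by omega) ?_
    · rw [show mid + 2 - 1 = mid + 1 from by ring] at h
      simpa using h
    · rintro ⟨h1, -⟩
      rw [show mid + 2 - 1 = mid + 1 from by ring,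
        empty_inner s.toList (mid + 1) (mid + 1) (by omega) (by omega) (by omega)]
      rfl
  | false =>
    have h := loopAB s.toList ((mid + 1).toNat) mid (mid + 1) 0 le_rfl (by omega) ?_
    · rw [show mid + 1 - 1 = mid from by ring] at h
      simpa using h
    · rintro ⟨h1, -⟩
      rw [show mid + 1 - 1 = mid from by ring,
        empty_inner s.toList (mid + 1) mid (by omega) (by omega) (by omega)]
      rfl
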